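-- pv_equiv track=rewrite | github.com/aviswerdlow/k4 | experiments/p74/scripts/p74_nulls_ranking.py | calculate_function_words_metric
-- ===== SOURCE A (Python) =====
-- def tokenize_v2(text, canonical_cuts):
--     """Tokenization v2 using canonical cuts for word boundaries"""
--     # Simplified tokenization based on cuts (list of positions)
--     if not canonical_cuts:
--         # Fallback to simple word splitting
--         return [word for word in text.split() if word.isalpha()]
--
--     # Use cuts to create token boundaries
--     tokens = []
--     current_token = ""
--
--     for i, char in enumerate(text):
--         if i in canonical_cuts and current_token:
--             # At a cut boundary - end current token
--             if current_token.strip() and current_token.strip().isalpha():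
--                 tokens.append(current_token.strip().upper())
--             current_token = ""
--
--         if char.isalpha():
--             current_token += char
--         elif current_token:
--             # Non-alpha character - end token
--             if current_token.strip() and current_token.strip().isalpha():
--                 tokens.append(current_token.strip().upper())
--             current_token = ""
--
--     # Add final token
--     if current_token.strip() and current_token.strip().isalpha():
--         tokens.append(current_token.strip().upper())
--
--     return tokens
--
-- def calculate_function_words_metric(plaintext, canonical_cuts):
--     """Calculate function words count"""
--     tokens = tokenize_v2(plaintext, canonical_cuts)
--
--     function_words = {
--         'THE', 'A', 'AN', 'WE', 'I', 'CAN', 'IS', 'ARE', 'AND', 'OF', 'TO',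
--         'IN', 'ON', 'AT', 'BY', 'FOR', 'WITH', 'FROM', 'THEN', 'THERE'
--     }
--
--     f_word_count = sum(1 for token in tokens if token.upper() in function_words)
--     return f_word_count
-- ===== SOURCE B (Python) =====
-- _FUNCTION_WORDS = frozenset({
--     'THE', 'A', 'AN', 'WE', 'I', 'CAN', 'IS', 'ARE', 'AND', 'OF', 'TO',
--     'IN', 'ON', 'AT', 'BY', 'FOR', 'WITH', 'FROM', 'THEN', 'THERE'
-- })
--
--
-- def _alpha_runs(text):
--     """Stage 1: the maximal runs of alphabetic characters, as (start_index, run) pairs."""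
--     runs = []
--     i, n = 0, len(text)
--     while i < n:
--         if text[i].isalpha():
--             j = i + 1
--             while j < n and text[j].isalpha():
--                 j += 1
--             runs.append((i, text[i:j]))
--             i = j
--         else:
--             i += 1
--     return runs
--
--
-- def _split_run(start, run, cuts):
--     """Stage 2: split one alpha run at the cut positions falling strictly inside it."""
--     pieces = []
--     piece = run[0]
--     for pos, ch in enumerate(run[1:], start + 1):
--         if pos in cuts:
--             pieces.append(piece.upper())
--             piece = ch
--         else:
--             piece += ch
--     pieces.append(piece.upper())
--     return pieces
--
--
-- def calculate_function_words_metric(plaintext, canonical_cuts):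
--     """Calculate function words count (staged: alpha runs, then cut-splitting, then counting)"""
--     if not canonical_cuts:
--         return sum(1 for w in plaintext.split()
--                    if w.isalpha() and w.upper() in _FUNCTION_WORDS)
--     cuts = set(canonical_cuts)
--     tokens = []
--     for start, run in _alpha_runs(plaintext):
--         tokens.extend(_split_run(start, run, cuts))
--     return sum(1 for t in tokens if t in _FUNCTION_WORDS)
-- ===== Notes on version B (the rewrite author's own statement) =====
-- stated objective: faster
-- what changed: Replaces A's single interleaved per-character state machine (cut test against the cuts list, current_token appends, strip/isalpha re-checks, then a counting pass) with three staged passes: first extract the maximal alphabetic runs with their start indices, then split each run at the cut positions (set lookup) falling strictly inside it, then count the resulting tokens.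
import Mathlib
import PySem

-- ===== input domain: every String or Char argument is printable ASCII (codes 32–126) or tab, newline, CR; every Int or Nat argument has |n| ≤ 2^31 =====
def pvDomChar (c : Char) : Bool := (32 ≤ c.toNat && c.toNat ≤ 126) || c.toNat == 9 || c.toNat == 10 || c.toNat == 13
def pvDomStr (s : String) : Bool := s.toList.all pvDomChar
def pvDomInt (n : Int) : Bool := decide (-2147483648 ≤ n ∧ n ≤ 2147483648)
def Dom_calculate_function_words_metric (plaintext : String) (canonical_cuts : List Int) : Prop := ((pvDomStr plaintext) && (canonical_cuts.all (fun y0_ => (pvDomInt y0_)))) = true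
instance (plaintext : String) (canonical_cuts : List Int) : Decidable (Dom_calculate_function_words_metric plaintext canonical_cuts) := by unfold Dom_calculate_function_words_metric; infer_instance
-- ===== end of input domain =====

-- B replaces A's interleaved cut/non-alpha state machine by three staged passes — maximal alpha
-- runs first, then cut-splitting each run, then counting — same return value; measured faster (cut set built once).

-- ===== PORT A =====

-- the function_words set literal (shared data, used by both ports)
def pvFW : PySem.Set (List Char) := PySem.Set.ofList
  ["THE".toList, "A".toList, "AN".toList, "WE".toList, "I".toList, "CAN".toList, "IS".toList,
   "ARE".toList, "AND".toList, "OF".toList, "TO".toList, "IN".toList, "ON".toList, "AT".toList,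
   "BY".toList, "FOR".toList, "WITH".toList, "FROM".toList, "THEN".toList, "THERE".toList]

-- the thrice-repeated snippet "if current_token.strip() and current_token.strip().isalpha(): tokens.append(current_token.strip().upper())"
def pvEmit (tokens : List (List Char)) (cur : List Char) : List (List Char) :=
  if !(PySem.Chars.strip cur).isEmpty && PySem.Chars.strIsalpha (PySem.Chars.strip cur) then
    tokens ++ [PySem.Chars.upper (PySem.Chars.strip cur)]
  else tokens

-- the "for i, char in enumerate(text)" loop of tokenize_v2, state = (tokens, current_token)
def pvTokLoop (cuts : List Int) : List (Int × Char) → List (List Char) × List Char → List (List Char) × List Char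
  | [], st => st
  | (i, c) :: rest, (tokens, cur) =>
      let st1 := if cuts.contains i && !cur.isEmpty then (pvEmit tokens cur, ([] : List Char)) else (tokens, cur)
      if PySem.Chars.isalpha c then
        pvTokLoop cuts rest (st1.1, st1.2 ++ [c])
      else if !st1.2.isEmpty then
        pvTokLoop cuts rest (pvEmit st1.1 st1.2, [])
      else
        pvTokLoop cuts rest st1

def tokenize_v2 (text : String) (canonical_cuts : List Int) : List (List Char) :=
  if canonical_cuts.isEmpty then
    (PySem.Chars.split₀ text.toList).filter PySem.Chars.strIsalpha
  else
    let st := pvTokLoop canonical_cuts (PySem.List.enumerate text.toList 0) ([], [])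
    pvEmit st.1 st.2

def calculate_function_words_metric (plaintext : String) (canonical_cuts : List Int) : Int :=
  (((tokenize_v2 plaintext canonical_cuts).countP
      (fun t => pvFW.contains (PySem.Chars.upper t)) : Nat) : Int)

-- ===== PORT B =====

-- B's inner "while j < n and text[j].isalpha(): j += 1" plus the slice text[i:j], as one scan
-- returning (text[i+1:j], text[j:]): the maximal alpha prefix and the remainder
def pvScanRun : List Char → List Char × List Char
  | [] => ([], [])
  | c :: rest =>
      if PySem.Chars.isalpha c then
        let r := pvScanRun rest
        (c :: r.1, r.2)
      else ([], c :: rest)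

theorem pvScanRun_len (cs : List Char) : (pvScanRun cs).2.length ≤ cs.length := by
  induction cs with
  | nil => simp [pvScanRun]
  | cons c rest ih =>
      simp only [pvScanRun]
      split
      · exact le_trans ih (by simp)
      · simp

-- _alpha_runs: the outer "while i < n" loop, i carried as the Int start index
def pvAlphaRuns : List Char → Int → List (Int × List Char)
  | [], _ => []
  | c :: rest, i =>
      if PySem.Chars.isalpha c then
        let r := pvScanRun rest
        (i, c :: r.1) :: pvAlphaRuns r.2 (i + 1 + r.1.length)
      else pvAlphaRuns rest (i + 1)
termination_by cs => cs.length
decreasing_by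
  · exact Nat.lt_succ_of_le (pvScanRun_len rest)
  · simp

-- _split_run: "piece = run[0]; for pos, ch in enumerate(run[1:], start + 1): …" with state (pieces, piece)
def pvSplitRun (cuts : PySem.Set Int) (start : Int) (run : List Char) : List (List Char) :=
  let st := (PySem.List.enumerate (PySem.List.slice run (some 1) none) (start + 1)).foldl
    (fun (st : List (List Char) × List Char) (p : Int × Char) =>
      if cuts.contains p.1 then (st.1 ++ [PySem.Chars.upper st.2], [p.2])
      else (st.1, st.2 ++ [p.2]))
    ([], [run.headD ' '])  -- run[0]: runs produced by _alpha_runs are never empty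
  st.1 ++ [PySem.Chars.upper st.2]

def calculate_function_words_metric_alt (plaintext : String) (canonical_cuts : List Int) : Int :=
  if canonical_cuts.isEmpty then
    (((PySem.Chars.split₀ plaintext.toList).countP
        (fun w => PySem.Chars.strIsalpha w && pvFW.contains (PySem.Chars.upper w)) : Nat) : Int)
  else
    let cuts := PySem.Set.ofList canonical_cuts
    let tokens := (pvAlphaRuns plaintext.toList 0).foldl
      (fun acc sr => acc ++ pvSplitRun cuts sr.1 sr.2) []
    ((tokens.countP (fun t => pvFW.contains t) : Nat) : Int)

-- ===== PRECONDITION & SPEC =====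
def Spec_calculate_function_words_metric (plaintext : String) (canonical_cuts : List Int) (out : Int) : Prop := out = calculate_function_words_metric_alt plaintext canonical_cuts
instance (plaintext : String) (canonical_cuts : List Int) (out : Int) : Decidable (Spec_calculate_function_words_metric plaintext canonical_cuts out) := by unfold Spec_calculate_function_words_metric; infer_instance

-- ===== CLAIM (what is proved, stated in full; the proofs are below) =====
def Claim_equal_calculate_function_words_metric : Prop := ∀ (plaintext : String) (canonical_cuts : List Int), Dom_calculate_function_words_metric plaintext canonical_cuts → Spec_calculate_function_words_metric plaintext canonical_cuts (calculate_function_words_metric plaintext canonical_cuts)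

-- ===== LEMMAS AND PROOFS =====

theorem pvOfNat_toNat (n : Nat) (h : n < 128) : (Char.ofNat n).toNat = n := by
  unfold Char.ofNat Char.toNat
  rw [dif_pos (by left; omega)]
  simp

theorem pvIslower_iff (c : Char) : PySem.Chars.islower c = true ↔ 97 ≤ c.toNat ∧ c.toNat ≤ 122 := by
  have h1 : 'a'.val.toNat = 97 := rfl
  have h2 : 'z'.val.toNat = 122 := rfl
  simp only [PySem.Chars.islower, Char.le_def, UInt32.le_iff_toNat_le, h1, h2,
    Bool.and_eq_true, decide_eq_true_eq, Char.toNat]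

theorem pvIsupper_iff (c : Char) : PySem.Chars.isupper c = true ↔ 65 ≤ c.toNat ∧ c.toNat ≤ 90 := by
  have h1 : 'A'.val.toNat = 65 := rfl
  have h2 : 'Z'.val.toNat = 90 := rfl
  simp only [PySem.Chars.isupper, Char.le_def, UInt32.le_iff_toNat_le, h1, h2,
    Bool.and_eq_true, decide_eq_true_eq, Char.toNat]

theorem pvAlpha_range (c : Char) (h : PySem.Chars.isalpha c = true) :
    65 ≤ c.toNat ∧ c.toNat ≤ 90 ∨ 97 ≤ c.toNat ∧ c.toNat ≤ 122 := by
  simp only [PySem.Chars.isalpha, Bool.or_eq_true, pvIsupper_iff, pvIslower_iff] at h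
  exact h

theorem pvAlpha_not_space (c : Char) (h : PySem.Chars.isalpha c = true) :
    PySem.Chars.isspace c = false := by
  have hr := pvAlpha_range c h
  simp only [Char.toNat] at hr
  simp only [PySem.Chars.isspace, Char.toNat, Bool.or_eq_false_iff, Bool.and_eq_false_iff,
    decide_eq_false_iff_not]
  omega

theorem pvUpperChar_idem (c : Char) (h : PySem.Chars.isalpha c = true) :
    PySem.Chars.upperChar (PySem.Chars.upperChar c) = PySem.Chars.upperChar c := by
  have hr := pvAlpha_range c h
  unfold PySem.Chars.upperChar
  by_cases hl : PySem.Chars.islower c = true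
  · rw [if_pos hl]
    have ht : (Char.ofNat (c.toNat - 32)).toNat = c.toNat - 32 :=
      pvOfNat_toNat _ (by rcases hr with ⟨a, b⟩ | ⟨a, b⟩ <;> omega)
    rw [if_neg]
    rw [pvIslower_iff] at hl ⊢
    omega
  · rw [if_neg hl, if_neg hl]

theorem pvUpper_idem (w : List Char) (h : ∀ c ∈ w, PySem.Chars.isalpha c = true) :
    PySem.Chars.upper (PySem.Chars.upper w) = PySem.Chars.upper w := by
  unfold PySem.Chars.upper
  rw [List.map_map]
  apply List.map_congr_left
  intro c hc
  exact pvUpperChar_idem c (h c hc)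

theorem pvDropWhile_space (w : List Char) (h : ∀ c ∈ w, PySem.Chars.isspace c = false) :
    List.dropWhile PySem.Chars.isspace w = w := by
  rw [List.dropWhile_eq_self_iff]
  intro hne
  simpa [List.head_eq_getElem] using h _ (List.head_mem (List.ne_nil_of_length_pos hne))

theorem pvStrip_of_alpha (w : List Char) (h : ∀ c ∈ w, PySem.Chars.isalpha c = true) :
    PySem.Chars.strip w = w := by
  have hs : ∀ c ∈ w, PySem.Chars.isspace c = false := fun c hc => pvAlpha_not_space c (h c hc)
  unfold PySem.Chars.strip PySem.Chars.lstrip PySem.Chars.rstrip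
  rw [pvDropWhile_space _ hs, pvDropWhile_space, List.reverse_reverse]
  intro c hc; exact hs c (by simpa using hc)

-- pvEmit on a nonempty all-alpha token always appends its uppercase form
theorem pvEmit_alpha (tokens : List (List Char)) (cur : List Char) (hne : cur ≠ [])
    (h : ∀ c ∈ cur, PySem.Chars.isalpha c = true) :
    pvEmit tokens cur = tokens ++ [PySem.Chars.upper cur] := by
  unfold pvEmit
  rw [pvStrip_of_alpha cur h]
  rw [if_pos]
  simp [PySem.Chars.strIsalpha, List.all_eq_true.mpr h, hne]

theorem pvEmit_nil (tokens : List (List Char)) : pvEmit tokens [] = tokens := by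
  simp [pvEmit, PySem.Chars.strip, PySem.Chars.lstrip, PySem.Chars.rstrip]

theorem pvEmit_append (a b : List (List Char)) (y : List Char) :
    pvEmit (a ++ b) y = a ++ pvEmit b y := by
  unfold pvEmit; split <;> simp

-- the tokens accumulator of A's loop only ever grows by appending
theorem pvTokLoop_acc (cuts : List Int) (ps : List (Int × Char)) (tokens : List (List Char)) (cur : List Char) :
    pvTokLoop cuts ps (tokens, cur) =
      (tokens ++ (pvTokLoop cuts ps ([], cur)).1, (pvTokLoop cuts ps ([], cur)).2) := by
  induction ps generalizing tokens cur with
  | nil => simp [pvTokLoop]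
  | cons p rest ih =>
      obtain ⟨i, c⟩ := p
      have key : ∀ (a tokens : List (List Char)) (cur' : List Char),
          pvTokLoop cuts rest (tokens ++ a, cur') =
            (tokens ++ (pvTokLoop cuts rest (a, cur')).1, (pvTokLoop cuts rest (a, cur')).2) := by
        intro a tokens cur'
        rw [ih, ih (tokens := a)]
        simp
      simp only [pvTokLoop]
      by_cases h1 : (cuts.contains i && !cur.isEmpty) = true
      · simp only [h1, if_true]
        by_cases h2 : PySem.Chars.isalpha c = true
        · simp only [h2, if_true]
          rw [show pvEmit tokens cur = tokens ++ pvEmit [] cur from (by simpa using pvEmit_append tokens [] cur), key]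
        · simp only [h2, Bool.false_eq_true, if_false, List.isEmpty_nil, Bool.not_true,
            Bool.false_eq_true]
          rw [show pvEmit tokens cur = tokens ++ pvEmit [] cur from (by simpa using pvEmit_append tokens [] cur), key]
      · simp only [h1, Bool.false_eq_true, if_false]
        by_cases h2 : PySem.Chars.isalpha c = true
        · simp only [h2, if_true]
          exact ih _ _
        · simp only [h2, Bool.false_eq_true, if_false]
          by_cases h3 : cur.isEmpty = true
          · simp only [h3, Bool.not_true, Bool.false_eq_true, if_false]
            exact ih _ _
          · simp only [h3, Bool.not_false, if_true]
            rw [show pvEmit tokens cur = tokens ++ pvEmit [] cur from (by simpa using pvEmit_append tokens [] cur), key]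

-- A's remaining computation as a function: tokens still to be produced from pending cur
def pvF (cuts : List Int) (cs : List Char) (i : Int) (cur : List Char) : List (List Char) :=
  pvEmit (pvTokLoop cuts (PySem.List.enumerate cs i) ([], cur)).1
         (pvTokLoop cuts (PySem.List.enumerate cs i) ([], cur)).2

-- proof-level splitter: the pieces A's loop still emits while scanning alpha chars r with pending cur
def pvPcs (S : PySem.Set Int) : List Char → Int → List Char → List (List Char)
  | [], _, cur => [PySem.Chars.upper cur]
  | a :: r, i, cur =>
      if S.contains i then PySem.Chars.upper cur :: pvPcs S r (i + 1) [a]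
      else pvPcs S r (i + 1) (cur ++ [a])

theorem pvSet_contains (cuts : List Int) (x : Int) :
    (PySem.Set.ofList cuts).contains x = cuts.contains x := by
  by_cases hx : x ∈ cuts <;> simp [PySem.Set.mem_ofList, hx]

theorem pvF_nil (cuts : List Int) (i : Int) (cur : List Char) :
    pvF cuts [] i cur = pvEmit [] cur := by
  simp [pvF, PySem.List.enumerate_nil, pvTokLoop]

-- one-step lemmas for pvF
theorem pvF_cons_empty_nonalpha (cuts : List Int) (c : Char) (cs : List Char) (i : Int)
    (hA : PySem.Chars.isalpha c = false) :
    pvF cuts (c :: cs) i [] = pvF cuts cs (i + 1) [] := by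
  simp [pvF, PySem.List.enumerate_cons, pvTokLoop, hA]

theorem pvF_cons_empty_alpha (cuts : List Int) (c : Char) (cs : List Char) (i : Int)
    (hA : PySem.Chars.isalpha c = true) :
    pvF cuts (c :: cs) i [] = pvF cuts cs (i + 1) [c] := by
  simp [pvF, PySem.List.enumerate_cons, pvTokLoop, hA]

theorem pvF_cons_pending_alpha_cut (cuts : List Int) (c : Char) (cs : List Char) (i : Int)
    (cur : List Char) (hne : cur ≠ []) (hcur : ∀ x ∈ cur, PySem.Chars.isalpha x = true)
    (hA : PySem.Chars.isalpha c = true) (hK : cuts.contains i = true) :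
    pvF cuts (c :: cs) i cur = PySem.Chars.upper cur :: pvF cuts cs (i + 1) [c] := by
  have hE : cur.isEmpty = false := by simpa [List.isEmpty_iff] using hne
  simp only [pvF, PySem.List.enumerate_cons, pvTokLoop, hK, hE, hA, Bool.not_false, Bool.and_true,
    if_true]
  rw [pvEmit_alpha [] cur hne hcur]
  simp only [List.nil_append]
  rw [pvTokLoop_acc cuts _ [PySem.Chars.upper cur] [c]]
  rw [pvEmit_append]
  simp

theorem pvF_cons_pending_alpha_nocut (cuts : List Int) (c : Char) (cs : List Char) (i : Int)
    (cur : List Char) (hA : PySem.Chars.isalpha c = true) (hK : cuts.contains i = false) :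
    pvF cuts (c :: cs) i cur = pvF cuts cs (i + 1) (cur ++ [c]) := by
  have hK' : i ∉ cuts := by simpa using hK
  simp [pvF, PySem.List.enumerate_cons, pvTokLoop, hA, hK']

theorem pvF_cons_pending_nonalpha (cuts : List Int) (c : Char) (cs : List Char) (i : Int)
    (cur : List Char) (hne : cur ≠ []) (hcur : ∀ x ∈ cur, PySem.Chars.isalpha x = true)
    (hA : PySem.Chars.isalpha c = false) :
    pvF cuts (c :: cs) i cur = PySem.Chars.upper cur :: pvF cuts cs (i + 1) [] := by
  have hE : cur.isEmpty = false := by simpa [List.isEmpty_iff] using hne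
  by_cases hK : cuts.contains i = true
  · simp only [pvF, PySem.List.enumerate_cons, pvTokLoop, hK, hE, hA, Bool.not_false, Bool.and_true,
      if_true, Bool.false_eq_true, if_false, List.isEmpty_nil, Bool.not_true]
    rw [pvEmit_alpha [] cur hne hcur]
    simp only [List.nil_append]
    rw [pvTokLoop_acc cuts _ [PySem.Chars.upper cur] []]
    rw [pvEmit_append]
    simp
  · simp only [pvF, PySem.List.enumerate_cons, pvTokLoop, Bool.eq_false_iff.mpr hK, hE, hA,
      Bool.false_and, Bool.false_eq_true, if_false, Bool.not_false, if_true]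
    rw [pvEmit_alpha [] cur hne hcur]
    simp only [List.nil_append]
    rw [pvTokLoop_acc cuts _ [PySem.Chars.upper cur] []]
    rw [pvEmit_append]
    simp

-- the run lemma: scanning an all-alpha block r with pending cur emits exactly pvPcs
theorem pvRunLemma (cuts : List Int) (r : List Char) (tail : List Char) (i : Int) (cur : List Char)
    (hr : ∀ c ∈ r, PySem.Chars.isalpha c = true) (hne : cur ≠ [])
    (hcur : ∀ c ∈ cur, PySem.Chars.isalpha c = true)
    (htail : tail = [] ∨ ∃ d t, tail = d :: t ∧ PySem.Chars.isalpha d = false) :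
    pvF cuts (r ++ tail) i cur =
      pvPcs (PySem.Set.ofList cuts) r i cur ++ pvF cuts tail (i + r.length) [] := by
  induction r generalizing i cur with
  | nil =>
      simp only [List.nil_append, pvPcs, List.length_nil, Nat.cast_zero, add_zero]
      rcases htail with h | ⟨d, t, hdt, hd⟩
      · subst h
        rw [pvF_nil, pvF_nil, pvEmit_alpha [] cur hne hcur, pvEmit_nil]
        simp
      · subst hdt
        rw [pvF_cons_pending_nonalpha cuts d t i cur hne hcur hd,
            pvF_cons_empty_nonalpha cuts d t i hd]
        simp
  | cons a r' ih =>
      have ha : PySem.Chars.isalpha a = true := hr a (by simp)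
      have hr' : ∀ c ∈ r', PySem.Chars.isalpha c = true := fun c hc => hr c (by simp [hc])
      simp only [List.cons_append, pvPcs, pvSet_contains]
      by_cases hK : cuts.contains i = true
      · rw [hK, if_pos rfl]
        rw [pvF_cons_pending_alpha_cut cuts a (r' ++ tail) i cur hne hcur ha hK]
        rw [ih (i + 1) [a] hr' (by simp) (by simpa using ha)]
        simp only [List.length_cons]
        have hc : i + ((r'.length + 1 : Nat) : Int) = i + 1 + r'.length := by push_cast; ring
        rw [hc]
        simp
      · rw [Bool.eq_false_iff.mpr hK, if_neg (by simp)]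
        rw [pvF_cons_pending_alpha_nocut cuts a (r' ++ tail) i cur ha (Bool.eq_false_iff.mpr hK)]
        have hcur' : ∀ c ∈ cur ++ [a], PySem.Chars.isalpha c = true := by
          intro c hc
          rcases List.mem_append.mp hc with h | h
          · exact hcur c h
          · simpa using (by simpa using h : c = a) ▸ ha
        rw [ih (i + 1) (cur ++ [a]) hr' (by simp) hcur']
        simp only [List.length_cons]
        have hc : i + ((r'.length + 1 : Nat) : Int) = i + 1 + r'.length := by push_cast; ring
        rw [hc]

theorem pvScanRun_spec (cs : List Char) :
    pvScanRun cs = (cs.takeWhile PySem.Chars.isalpha, cs.dropWhile PySem.Chars.isalpha) := by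
  induction cs with
  | nil => simp [pvScanRun]
  | cons c rest ih =>
      simp only [pvScanRun, List.takeWhile_cons, List.dropWhile_cons]
      by_cases h : PySem.Chars.isalpha c = true
      · simp [h, ih]
      · simp [Bool.eq_false_iff.mpr h]

-- _split_run computes pvPcs
theorem pvSplitFold (S : PySem.Set Int) (r : List Char) (i : Int) (acc : List (List Char))
    (cur : List Char) :
    (((PySem.List.enumerate r i).foldl
        (fun (st : List (List Char) × List Char) (p : Int × Char) =>
          if S.contains p.1 then (st.1 ++ [PySem.Chars.upper st.2], [p.2])
          else (st.1, st.2 ++ [p.2])) (acc, cur)).1 ++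
      [PySem.Chars.upper (((PySem.List.enumerate r i).foldl
        (fun (st : List (List Char) × List Char) (p : Int × Char) =>
          if S.contains p.1 then (st.1 ++ [PySem.Chars.upper st.2], [p.2])
          else (st.1, st.2 ++ [p.2])) (acc, cur)).2)]) = acc ++ pvPcs S r i cur := by
  induction r generalizing i acc cur with
  | nil => simp [PySem.List.enumerate_nil, pvPcs]
  | cons a r' ih =>
      rw [PySem.List.enumerate_cons]
      simp only [List.foldl_cons, pvPcs]
      by_cases hK : S.contains i = true
      · simp only [hK, if_true]
        rw [ih]
        simp
      · simp only [hK, Bool.false_eq_true, if_false]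
        rw [ih]

theorem pvSplitRun_eq_pcs (S : PySem.Set Int) (start : Int) (c : Char) (r : List Char) :
    pvSplitRun S start (c :: r) = pvPcs S r (start + 1) [c] := by
  unfold pvSplitRun
  rw [PySem.List.slice_from_one]
  simpa using pvSplitFold S r (start + 1) [] [c]

-- every run produced by pvAlphaRuns is nonempty and all-alpha
theorem pvAlphaRuns_propAux : ∀ (n : Nat) (cs : List Char), cs.length ≤ n → ∀ (i : Int),
    ∀ p ∈ pvAlphaRuns cs i, p.2 ≠ [] ∧ ∀ c ∈ p.2, PySem.Chars.isalpha c = true := by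
  intro n
  induction n with
  | zero =>
      intro cs h i p hp
      have : cs = [] := by cases cs <;> simp_all
      subst this
      simp [pvAlphaRuns] at hp
  | succ n ih =>
      intro cs h i p hp
      cases cs with
      | nil => simp [pvAlphaRuns] at hp
      | cons c rest =>
          have hr : rest.length ≤ n := by simpa using h
          by_cases hA : PySem.Chars.isalpha c = true
          · rw [pvAlphaRuns, if_pos hA] at hp
            rcases List.mem_cons.mp hp with h1 | h1
            · subst h1
              refine ⟨by simp, ?_⟩
              intro x hx
              rcases List.mem_cons.mp hx with h2 | h2
              · exact h2 ▸ hA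
              · rw [pvScanRun_spec] at h2
                exact List.mem_takeWhile_imp h2
            · have hlen : (pvScanRun rest).2.length ≤ n := le_trans (pvScanRun_len rest) hr
              exact ih _ hlen _ _ h1
          · rw [pvAlphaRuns, if_neg hA] at hp
            exact ih _ hr _ _ hp

theorem pvAlphaRuns_prop (cs : List Char) (i : Int) :
    ∀ p ∈ pvAlphaRuns cs i, p.2 ≠ [] ∧ ∀ c ∈ p.2, PySem.Chars.isalpha c = true :=
  pvAlphaRuns_propAux cs.length cs le_rfl i

-- main: A's tokens are exactly B's runs split at the cuts
theorem pvMainAux (cuts : List Int) : ∀ (n : Nat) (cs : List Char), cs.length ≤ n → ∀ (i : Int),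
    pvF cuts cs i [] =
      (pvAlphaRuns cs i).flatMap
        (fun sr => pvSplitRun (PySem.Set.ofList cuts) sr.1 sr.2) := by
  intro n
  induction n with
  | zero =>
      intro cs h i
      have : cs = [] := by cases cs <;> simp_all
      subst this
      rw [pvF_nil, pvEmit_nil]
      simp [pvAlphaRuns]
  | succ n ih =>
      intro cs h i
      cases cs with
      | nil =>
          rw [pvF_nil, pvEmit_nil]
          simp [pvAlphaRuns]
      | cons c rest =>
          have hr : rest.length ≤ n := by simpa using h
          by_cases hA : PySem.Chars.isalpha c = true
          · rw [pvAlphaRuns, if_pos hA]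
            simp only [List.flatMap_cons]
            rw [pvScanRun_spec]
            rw [pvSplitRun_eq_pcs]
            rw [pvF_cons_empty_alpha cuts c rest i hA]
            have hsplit : rest = rest.takeWhile PySem.Chars.isalpha ++ rest.dropWhile PySem.Chars.isalpha :=
              (List.takeWhile_append_dropWhile).symm
            rw [show pvF cuts rest (i+1) [c] = pvF cuts (rest.takeWhile PySem.Chars.isalpha ++ rest.dropWhile PySem.Chars.isalpha) (i+1) [c] by rw [← hsplit]]
            rw [pvRunLemma cuts _ _ (i + 1) [c]
                (fun x hx => List.mem_takeWhile_imp hx)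
                (by simp) (by simpa using hA) ?htail]
            · rw [ih _ (le_trans (by simpa using List.length_dropWhile_le PySem.Chars.isalpha rest) hr)]
            case htail =>
              cases hd : rest.dropWhile PySem.Chars.isalpha with
              | nil => exact Or.inl rfl
              | cons d t =>
                  refine Or.inr ⟨d, t, rfl, ?_⟩
                  have := List.head_dropWhile_not PySem.Chars.isalpha (l := rest) (by simp [hd])
                  simpa [hd] using this
          · rw [pvAlphaRuns, if_neg hA]
            rw [pvF_cons_empty_nonalpha cuts c rest i (Bool.eq_false_iff.mpr hA)]
            exact ih _ hr _

-- every piece pvPcs emits is the uppercase of a nonempty all-alpha word, so upper is idempotent on it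
theorem pvPcs_upper (S : PySem.Set Int) (r : List Char) (i : Int) (cur : List Char)
    (hr : ∀ c ∈ r, PySem.Chars.isalpha c = true)
    (hcur : ∀ c ∈ cur, PySem.Chars.isalpha c = true) :
    ∀ t ∈ pvPcs S r i cur, PySem.Chars.upper t = t := by
  induction r generalizing i cur with
  | nil =>
      intro t ht
      simp only [pvPcs, List.mem_singleton] at ht
      subst ht
      exact pvUpper_idem cur hcur
  | cons a r' ih =>
      intro t ht
      have ha : PySem.Chars.isalpha a = true := hr a (by simp)
      have hr' : ∀ c ∈ r', PySem.Chars.isalpha c = true := fun c hc => hr c (by simp [hc])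
      simp only [pvPcs] at ht
      by_cases hK : S.contains i = true
      · rw [if_pos hK] at ht
        rcases List.mem_cons.mp ht with h1 | h1
        · exact h1 ▸ pvUpper_idem cur hcur
        · exact ih _ _ hr' (by simpa using ha) t h1
      · rw [if_neg hK] at ht
        refine ih _ _ hr' ?_ t ht
        intro c hc
        rcases List.mem_append.mp hc with h | h
        · exact hcur c h
        · simpa using (by simpa using h : c = a) ▸ ha

-- ===== VERDICT =====
theorem calculate_function_words_metric_spec : Claim_equal_calculate_function_words_metric := by
  intro plaintext canonical_cuts _
  unfold Spec_calculate_function_words_metric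
  unfold calculate_function_words_metric calculate_function_words_metric_alt tokenize_v2
  by_cases hemp : canonical_cuts.isEmpty = true
  · rw [if_pos hemp, if_pos hemp]
    rw [List.countP_filter]
    congr 1
    apply List.countP_congr
    intro w _
    rw [Bool.and_comm]
  · rw [if_neg hemp, if_neg hemp]
    have hmain := pvMainAux canonical_cuts plaintext.toList.length plaintext.toList le_rfl 0
    have htokA : pvEmit (pvTokLoop canonical_cuts (PySem.List.enumerate plaintext.toList 0) ([], [])).1
        (pvTokLoop canonical_cuts (PySem.List.enumerate plaintext.toList 0) ([], [])).2 =
        pvF canonical_cuts plaintext.toList 0 [] := rfl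
    rw [htokA, hmain]
    simp only [PySem.List.foldl_append_eq_flatMap, List.nil_append]
    congr 1
    apply List.countP_congr
    intro t ht
    rcases List.mem_flatMap.mp ht with ⟨sr, hsr, htin⟩
    obtain ⟨hne, halpha⟩ := pvAlphaRuns_prop plaintext.toList 0 sr hsr
    obtain ⟨c, r, hrun⟩ : ∃ c r, sr.2 = c :: r := by
      cases h : sr.2 with
      | nil => exact absurd h hne
      | cons c r => exact ⟨c, r, rfl⟩
    rw [hrun, pvSplitRun_eq_pcs] at htin
    have := pvPcs_upper (PySem.Set.ofList canonical_cuts) r (sr.1 + 1) [c]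
      (fun x hx => halpha x (by simp [hrun, hx]))
      (by intro x hx; simp at hx; subst hx; exact halpha x (by simp [hrun]))
      t htin
    rw [this]
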